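-- pv_equiv track=rewrite | github.com/cepdnaclk/e20-4yp-onchip-offline-neuromorphic-computing | tools/analyze_weight_clamp_saturation.py | layer_stats
-- ===== SOURCE A (Python) =====
-- from typing import List, Tuple
--
-- def layer_stats(mat: List[List[int]], clamp: int) -> dict:
--     flat = [v for r in mat for v in r]
--     n = len(flat)
--     pos = sum(1 for v in flat if v == clamp)
--     neg = sum(1 for v in flat if v == -clamp)
--     z = sum(1 for v in flat if v == 0)
--     max_abs = max(abs(v) for v in flat)
--     return {
--         "count": n,
--         "pos_clamp": pos,
--         "neg_clamp": neg,
--         "zero": z,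
--         "max_abs": max_abs,
--     }
-- ===== SOURCE B (Python) =====
-- def layer_stats(mat, clamp):
--     count = pos = neg = zero = 0
--     max_abs = None
--     for r in mat:
--         for v in r:
--             count += 1
--             if v == clamp:
--                 pos += 1
--             if v == -clamp:
--                 neg += 1
--             if v == 0:
--                 zero += 1
--             a = -v if v < 0 else v
--             if max_abs is None or a > max_abs:
--                 max_abs = a
--     if max_abs is None:
--         raise ValueError("layer_stats: empty matrix")
--     return {
--         "count": count,
--         "pos_clamp": pos,
--         "neg_clamp": neg,
--         "zero": zero,
--         "max_abs": max_abs,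
--     }
-- ===== Notes on version B (the rewrite author's own statement) =====
-- stated objective: faster
-- what changed: Replaced A's flatten-into-a-list plus five separate passes (len, three counting sums, max) with a single nested loop over the matrix maintaining five accumulators (count, pos, neg, zero, running max of abs); Pre_ excludes only element-free matrices, where both A and B raise ValueError.
import Mathlib
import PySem

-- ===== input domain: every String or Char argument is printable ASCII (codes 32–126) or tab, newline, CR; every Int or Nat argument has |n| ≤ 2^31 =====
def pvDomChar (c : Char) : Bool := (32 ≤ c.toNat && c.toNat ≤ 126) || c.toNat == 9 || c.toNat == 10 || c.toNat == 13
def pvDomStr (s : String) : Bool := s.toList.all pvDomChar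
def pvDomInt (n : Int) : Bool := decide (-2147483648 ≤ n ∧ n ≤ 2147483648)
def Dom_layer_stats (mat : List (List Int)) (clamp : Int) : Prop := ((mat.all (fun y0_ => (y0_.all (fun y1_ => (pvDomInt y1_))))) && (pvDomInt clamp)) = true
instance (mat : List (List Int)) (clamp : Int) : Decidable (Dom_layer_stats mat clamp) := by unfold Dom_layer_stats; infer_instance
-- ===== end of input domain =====

-- B replaces A's flatten-then-five-passes with one nested loop keeping five accumulators
-- (count, pos, neg, zero, running max of |v|); on an empty matrix both raise ValueError.

-- ===== PORT A =====
def layer_stats (mat : List (List Int)) (clamp : Int) : List (String × Int) :=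
  let flat : List Int := mat.flatMap (fun r => r)
  let n : Int := (flat.length : Int)
  let pos : Int := flat.foldl (fun s v => if v = clamp then s + 1 else s) 0
  let neg : Int := flat.foldl (fun s v => if v = -clamp then s + 1 else s) 0
  let z : Int := flat.foldl (fun s v => if v = 0 then s + 1 else s) 0
  -- max(abs(v) for v in flat): raises ValueError on an empty flat (excluded by Pre_); 0 is a placeholder there
  let max_abs : Int :=
    match flat.map (fun v => |v|) with
    | [] => 0
    | h :: t => t.foldl max h
  [("count", n), ("pos_clamp", pos), ("neg_clamp", neg), ("zero", z), ("max_abs", max_abs)]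

-- ===== PORT B =====
-- B's running-max update: a = (-v if v < 0 else v); replace when max_abs is None or a > max_abs
def lsMaxStep (o : Option Int) (v : Int) : Option Int :=
  match o with
  | none => some (if v < 0 then -v else v)
  | some m => if (if v < 0 then -v else v) > m then some (if v < 0 then -v else v) else some m

-- B's inner-loop body: one element updates all five accumulators
def lsStep (clamp : Int) (acc : Int × Int × Int × Int × Option Int) (v : Int) :
    Int × Int × Int × Int × Option Int :=
  ⟨acc.1 + 1,
   (if v = clamp then acc.2.1 + 1 else acc.2.1),
   (if v = -clamp then acc.2.2.1 + 1 else acc.2.2.1),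
   (if v = 0 then acc.2.2.2.1 + 1 else acc.2.2.2.1),
   lsMaxStep acc.2.2.2.2 v⟩

def layer_stats_alt (mat : List (List Int)) (clamp : Int) : List (String × Int) :=
  let s := mat.foldl (fun acc r => r.foldl (lsStep clamp) acc) (0, 0, 0, 0, none)
  -- Python B raises ValueError when max_abs is still None (excluded by Pre_); [] is a placeholder there
  match s.2.2.2.2 with
  | none => []
  | some m =>
    [("count", s.1), ("pos_clamp", s.2.1), ("neg_clamp", s.2.2.1),
     ("zero", s.2.2.2.1), ("max_abs", m)]

-- ===== PRECONDITION & SPEC =====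
-- Pre_ excludes matrices with no elements at all: there A's max(...) raises ValueError (and B raises too).
def Pre_layer_stats (mat : List (List Int)) (clamp : Int) : Prop :=
  mat.flatMap (fun r => r) ≠ []
instance (mat : List (List Int)) (clamp : Int) : Decidable (Pre_layer_stats mat clamp) := by
  unfold Pre_layer_stats; infer_instance

def pvWitness_layer_stats : List (List Int) × Int := ([[1, -2], [0]], 2)

def Spec_layer_stats (mat : List (List Int)) (clamp : Int) (out : List (String × Int)) : Prop := out = layer_stats_alt mat clamp
instance (mat : List (List Int)) (clamp : Int) (out : List (String × Int)) : Decidable (Spec_layer_stats mat clamp out) := by unfold Spec_layer_stats; infer_instance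

-- ===== CLAIM (what is proved, stated in full; the proofs are below) =====
def Claim_equal_layer_stats : Prop := ∀ (mat : List (List Int)) (clamp : Int), Dom_layer_stats mat clamp → Pre_layer_stats mat clamp → Spec_layer_stats mat clamp (layer_stats mat clamp)

-- ===== LEMMAS AND PROOFS =====

-- nested foldl over rows = foldl over the flattened list
theorem ls_foldl_flat {α : Type} (f : α → Int → α) :
    ∀ (mat : List (List Int)) (init : α),
      mat.foldl (fun acc r => r.foldl f acc) init = (mat.flatMap (fun r => r)).foldl f init := by
  intro mat
  induction mat with
  | nil => intro init; simp
  | cons r rest ih => intro init; simp [List.foldl_append, ih]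

-- shift lemma for A's counting folds
theorem ls_count_shift (P : Int → Prop) [DecidablePred P] :
    ∀ (l : List Int) (s : Int),
      l.foldl (fun s v => if P v then s + 1 else s) s
        = s + l.foldl (fun s v => if P v then s + 1 else s) 0 := by
  intro l
  induction l with
  | nil => intro s; simp
  | cons v t ih =>
    intro s
    simp only [List.foldl_cons]
    rw [ih, ih (if P v then 0 + 1 else 0)]
    split_ifs <;> ring

-- the abs expression of B equals |v|
theorem ls_abs (v : Int) : (if v < 0 then -v else v) = |v| := by
  rcases lt_or_ge v 0 with h | h
  · simp [h, abs_of_neg h]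
  · simp [not_lt.mpr h, abs_of_nonneg h]

-- B's running option-max from a some state = A's plain max fold over the absolutes
theorem ls_optmax (l : List Int) :
    ∀ (m : Int), l.foldl lsMaxStep (some m) = some ((l.map (fun v => |v|)).foldl max m) := by
  induction l with
  | nil => intro m; simp
  | cons v t ih =>
    intro m
    simp only [List.foldl_cons, List.map_cons, lsMaxStep, ls_abs]
    have h2 : (if |v| > m then some |v| else some m) = some (max m |v|) := by
      split_ifs with h
      · rw [max_eq_right h.le]
      · rw [max_eq_left (not_lt.mp h)]
    rw [h2, ih]

-- the combined accumulator fold, componentwise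
theorem ls_combined (clamp : Int) :
    ∀ (l : List Int) (n p g z : Int) (m : Option Int),
      l.foldl (lsStep clamp) (n, p, g, z, m)
        = (n + (l.length : Int),
           p + l.foldl (fun s v => if v = clamp then s + 1 else s) 0,
           g + l.foldl (fun s v => if v = -clamp then s + 1 else s) 0,
           z + l.foldl (fun s v => if v = 0 then s + 1 else s) 0,
           l.foldl lsMaxStep m) := by
  intro l
  induction l with
  | nil => intro n p g z m; simp
  | cons v t ih =>
    intro n p g z m
    simp only [List.foldl_cons, lsStep]
    rw [ih]
    simp only [Prod.mk.injEq]
    refine ⟨?_, ?_, ?_, ?_, trivial⟩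
    · simp only [List.length_cons]; push_cast; ring
    · rw [ls_count_shift (fun v => v = clamp) t (if v = clamp then 0 + 1 else 0)]
      split_ifs <;> ring
    · rw [ls_count_shift (fun v => v = -clamp) t (if v = -clamp then 0 + 1 else 0)]
      split_ifs <;> ring
    · rw [ls_count_shift (fun v => v = 0) t (if v = 0 then 0 + 1 else 0)]
      split_ifs <;> ring

-- ===== VERDICT (by name: the statement is the Claim_ definition above) =====
theorem layer_stats_spec : Claim_equal_layer_stats := by
  intro mat clamp _ hpre
  unfold Spec_layer_stats layer_stats layer_stats_alt
  rw [ls_foldl_flat, ls_combined]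
  obtain ⟨h, t, hflat⟩ := List.exists_cons_of_ne_nil hpre
  rw [hflat]
  simp only [List.foldl_cons, List.map_cons, lsMaxStep, ls_abs]
  rw [ls_optmax t |h|]
  simp [List.length_cons]
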